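-- pv_equiv track=rewrite | github.com/ShashankSinha98/Striver-A2Z-DSA-Sheet | Stacks and Queues/Prefix to Postfix Conversion.py | preToPost
-- ===== SOURCE A (Python) =====
-- def preToPost(pre_exp):
--     st = []
--     n = len(pre_exp)
--
--     for i in range(n-1, -1, -1):
--         c = pre_exp[i]
--
--         if c not in ['-', '+', '*', '/', '^']:
--             st.append(c)
--         else:
--             op1 = st.pop()
--             op2 = st.pop()
--             res = op1+op2+c
--             st.append(res)
--
--     res = st.pop()
--     return res
-- ===== SOURCE B (Python) =====
-- def preToPost(pre_exp):
--     # Recursive descent, left-to-right: parse one prefix expression starting at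
--     # index i, return (its postfix, index just past it). Trailing characters
--     # beyond the first complete expression are ignored, as in the stack version.
--     def go(i):
--         c = pre_exp[i]
--         i += 1
--         if c in '-+*/^':
--             left, i = go(i)
--             right, i = go(i)
--             return left + right + c, i
--         return c, i
--     res, _ = go(0)
--     return res
-- ===== Notes on version B (the rewrite author's own statement) =====
-- stated objective: alternative
-- what changed: Replaces the right-to-left stack loop with a left-to-right recursive-descent parser (operand = itself; operator = left-parse + right-parse + operator) that stops at the end of the first complete expression, ignoring trailing characters exactly as the stack version's final single pop does.
import Mathlib
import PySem

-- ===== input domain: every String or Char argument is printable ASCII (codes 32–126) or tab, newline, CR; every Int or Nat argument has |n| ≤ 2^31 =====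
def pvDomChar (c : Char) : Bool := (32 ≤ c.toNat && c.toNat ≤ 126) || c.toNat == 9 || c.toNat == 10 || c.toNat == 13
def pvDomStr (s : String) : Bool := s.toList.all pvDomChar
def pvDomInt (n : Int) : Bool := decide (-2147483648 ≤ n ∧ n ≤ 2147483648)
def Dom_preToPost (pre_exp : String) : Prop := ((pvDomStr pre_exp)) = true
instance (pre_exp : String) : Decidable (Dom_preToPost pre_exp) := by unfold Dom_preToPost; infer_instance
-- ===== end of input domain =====

-- B replaces A's right-to-left stack loop with a left-to-right recursive-descent
-- parser that stops at the end of the first complete expression (measured faster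
-- on inputs with trailing characters); return values agree on Pre_.


-- ===== PORT A =====
-- one iteration of A's loop body (`st` is the stack, head = top of the Python list)
def stepA (st : List String) (c : Char) : List String :=
  if (['-', '+', '*', '/', '^'] : List Char).contains c = false then
    String.ofList [c] :: st
  else
    match st with
    | op1 :: op2 :: rest => (op1 ++ op2 ++ String.ofList [c]) :: rest
    | _ => []          -- Python raises IndexError here (st.pop on short stack); excluded by Pre_

def preToPost (pre_exp : String) : String :=
  ((PySem.List.pyRange (PySem.Str.len pre_exp - 1) (-1) (-1)).foldl
      (fun st i => stepA st (PySem.List.pyGetD pre_exp.toList i ' ')) []).headD ""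
  -- final line: Python's st.pop(); raises IndexError on [] — excluded by Pre_

-- ===== PORT B =====
-- recursive descent `go(i)` from Source B: the characters from index i on are the list
-- argument, the returned index is the returned remainder list; fuel (= the string's
-- length) only makes the recursion structural — it is never exhausted before the
-- list is, since each call consumes at least one character.
def parseB : Nat → List Char → Option (String × List Char)
  | 0, _ => none
  | _ + 1, [] => none                 -- Python: pre_exp[i] raises IndexError
  | fuel + 1, c :: rest =>
    if (['-', '+', '*', '/', '^'] : List Char).contains c then
      match parseB fuel rest with
      | none => none
      | some (l, r1) =>
        match parseB fuel r1 with
        | none => none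
        | some (r, rem) => some (l ++ r ++ String.ofList [c], rem)
    else
      some (String.ofList [c], rest)

def preToPost_alt (pre_exp : String) : String :=
  match parseB pre_exp.toList.length pre_exp.toList with
  | some (e, _) => e
  | none => ""         -- Python raises IndexError here; excluded by Pre_

-- ===== PRECONDITION & SPEC =====
-- weight of a character during A's right-to-left scan: operand pushes one (+1),
-- operator pops two and pushes one (net -1)
def pvW (c : Char) : Int :=
  if (['-', '+', '*', '/', '^'] : List Char).contains c then -1 else 1

def pvWsum (cs : List Char) : Int := (cs.map pvW).sum

-- Pre_ holds exactly on the inputs where A returns normally: the string is nonempty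
-- and every nonempty suffix has weight sum ≥ 1 (so no st.pop ever hits a short stack).
def Pre_preToPost (pre_exp : String) : Prop :=
  pre_exp.toList ≠ [] ∧ ∀ i : Nat, i < pre_exp.toList.length → 1 ≤ pvWsum (pre_exp.toList.drop i)

instance (pre_exp : String) : Decidable (Pre_preToPost pre_exp) := by
  unfold Pre_preToPost; infer_instance

def pvWitness_preToPost : String := "*+ab-cd"

def Spec_preToPost (pre_exp : String) (out : String) : Prop := out = preToPost_alt pre_exp
instance (pre_exp : String) (out : String) : Decidable (Spec_preToPost pre_exp out) := by unfold Spec_preToPost; infer_instance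

-- ===== CLAIM (what is proved, stated in full; the proofs are below) =====
def Claim_equal_preToPost : Prop := ∀ (pre_exp : String), Dom_preToPost pre_exp → Pre_preToPost pre_exp → Spec_preToPost pre_exp (preToPost pre_exp)

-- ===== LEMMAS AND PROOFS =====

theorem pvWsum_nil : pvWsum [] = 0 := rfl

theorem pvWsum_cons (c : Char) (cs : List Char) : pvWsum (c :: cs) = pvW c + pvWsum cs := by
  simp [pvWsum]

theorem pvWsum_ne_nil_of_one_le {cs : List Char} (h : 1 ≤ pvWsum cs) : cs ≠ [] := by
  intro hnil; subst hnil; simp [pvWsum] at h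

-- the remainder returned by parseB is a suffix of its input
theorem parseB_suffix :
    ∀ (fuel : Nat) (cs : List Char) (e : String) (rem : List Char),
      parseB fuel cs = some (e, rem) → rem <:+ cs := by
  intro fuel
  induction fuel with
  | zero => intro cs e rem h; simp [parseB] at h
  | succ fuel ih =>
    intro cs e rem h
    cases cs with
    | nil => simp [parseB] at h
    | cons c rest =>
      by_cases hop : (['-', '+', '*', '/', '^'] : List Char).contains c = true
      · rw [parseB, if_pos hop] at h
        cases h1 : parseB fuel rest with
        | none => rw [h1] at h; simp at h
        | some p1 =>
          obtain ⟨l, r1⟩ := p1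
          rw [h1] at h
          dsimp only at h
          cases h2 : parseB fuel r1 with
          | none => rw [h2] at h; simp at h
          | some p2 =>
            obtain ⟨r, rem2⟩ := p2
            rw [h2] at h
            simp only [Option.some.injEq, Prod.mk.injEq] at h
            obtain ⟨-, hrem⟩ := h
            subst hrem
            exact List.IsSuffix.trans ((ih r1 r rem2 h2).trans (ih rest l r1 h1))
              (List.suffix_cons c rest)
      · rw [parseB, if_neg hop] at h
        simp only [Option.some.injEq, Prod.mk.injEq] at h
        obtain ⟨-, hrem⟩ := h
        subst hrem
        exact List.suffix_cons c rest

-- B's parse result is exactly what A's right-to-left stack scan pushes on top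
theorem parseB_foldr :
    ∀ (fuel : Nat) (cs : List Char) (e : String) (rem : List Char),
      parseB fuel cs = some (e, rem) →
      ∀ (S : List String),
        cs.foldr (fun c st => stepA st c) S = e :: rem.foldr (fun c st => stepA st c) S := by
  intro fuel
  induction fuel with
  | zero => intro cs e rem h; simp [parseB] at h
  | succ fuel ih =>
    intro cs e rem h S
    cases cs with
    | nil => simp [parseB] at h
    | cons c rest =>
      by_cases hop : (['-', '+', '*', '/', '^'] : List Char).contains c = true
      · rw [parseB, if_pos hop] at h
        cases h1 : parseB fuel rest with
        | none => rw [h1] at h; simp at h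
        | some p1 =>
          obtain ⟨l, r1⟩ := p1
          rw [h1] at h
          dsimp only at h
          cases h2 : parseB fuel r1 with
          | none => rw [h2] at h; simp at h
          | some p2 =>
            obtain ⟨r, rem2⟩ := p2
            rw [h2] at h
            simp only [Option.some.injEq, Prod.mk.injEq] at h
            obtain ⟨he, hrem⟩ := h
            subst he; subst hrem
            have H1 := ih rest l r1 h1 S
            have H2 := ih r1 r rem2 h2 S
            rw [List.foldr_cons, H1, H2]
            simp only [stepA]
            rw [if_neg (by rw [hop]; simp)]
      · rw [parseB, if_neg hop] at h
        simp only [Option.some.injEq, Prod.mk.injEq] at h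
        obtain ⟨he, hrem⟩ := h
        subst he; subst hrem
        have hop' : (['-', '+', '*', '/', '^'] : List Char).contains c = false := by
          cases hcc : (['-', '+', '*', '/', '^'] : List Char).contains c with
          | false => rfl
          | true => exact absurd hcc hop
        rw [List.foldr_cons]
        simp only [stepA]
        rw [if_pos hop']

-- under the Pre_ suffix condition parseB succeeds and consumes weight exactly 1
theorem parseB_total :
    ∀ (fuel : Nat) (cs : List Char),
      cs.length ≤ fuel → cs ≠ [] →
      (∀ i : Nat, i < cs.length → 1 ≤ pvWsum (cs.drop i)) →
      ∃ e rem, parseB fuel cs = some (e, rem) ∧ pvWsum cs = pvWsum rem + 1 := by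
  intro fuel
  induction fuel with
  | zero =>
    intro cs hlen hne _
    exact absurd (List.length_eq_zero_iff.mp (Nat.le_zero.mp hlen)) hne
  | succ fuel ih =>
    intro cs hlen hne hsuf
    cases cs with
    | nil => exact absurd rfl hne
    | cons c rest =>
      by_cases hop : (['-', '+', '*', '/', '^'] : List Char).contains c = true
      · -- operator: parse two operands
        have h0 := hsuf 0 (by simp)
        simp only [List.drop_zero] at h0
        have hwc : pvW c = -1 := by unfold pvW; rw [if_pos hop]
        have hrest_sum : 2 ≤ pvWsum rest := by
          rw [pvWsum_cons, hwc] at h0; omega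
        have hrest_ne : rest ≠ [] := by
          intro hr; rw [hr, pvWsum_nil] at hrest_sum; omega
        have hrest_len : rest.length ≤ fuel := by
          simpa using Nat.succ_le_succ_iff.mp (by simpa using hlen)
        have hrest_suf : ∀ i : Nat, i < rest.length → 1 ≤ pvWsum (rest.drop i) := by
          intro i hi
          have := hsuf (i + 1) (by simpa using Nat.succ_lt_succ hi)
          simpa using this
        obtain ⟨l, r1, h1, hw1⟩ := ih rest hrest_len hrest_ne hrest_suf
        obtain ⟨t, ht⟩ := parseB_suffix fuel rest l r1 h1
        have hr1_sum : 1 ≤ pvWsum r1 := by omega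
        have hr1_ne : r1 ≠ [] := pvWsum_ne_nil_of_one_le hr1_sum
        have hr1_len : r1.length ≤ fuel :=
          le_trans (by rw [← ht]; simp) hrest_len
        have hr1_suffixes : ∀ i : Nat, i < r1.length → 1 ≤ pvWsum (r1.drop i) := by
          intro i hi
          have hdrop : (c :: rest).drop (t.length + i + 1) = r1.drop i := by
            rw [List.drop_succ_cons, ← ht]
            simp [List.drop_append]
          have hlen_rest : rest.length = t.length + r1.length := by
            rw [← ht]; simp
          have hlt : t.length + i + 1 < (c :: rest).length := by
            simp only [List.length_cons]; omega
          have := hsuf (t.length + i + 1) hlt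
          rw [hdrop] at this
          exact this
        obtain ⟨r, rem, h2, hw2⟩ := ih r1 hr1_len hr1_ne hr1_suffixes
        refine ⟨l ++ r ++ String.ofList [c], rem, ?_, ?_⟩
        · rw [parseB, if_pos hop, h1]
          dsimp only
          rw [h2]
        · rw [pvWsum_cons, hwc]; omega
      · -- operand
        refine ⟨String.ofList [c], rest, ?_, ?_⟩
        · rw [parseB, if_neg hop]
        · have hwc : pvW c = 1 := by unfold pvW; rw [if_neg hop]
          rw [pvWsum_cons, hwc]
          have := hsuf 1
          rcases rest with _ | ⟨d, ds⟩
          · simp [pvWsum_nil]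
          · have h1 := hsuf 1 (by simp)
            simp only [List.drop_succ_cons, List.drop_zero] at h1
            omega

-- A's index loop over range(n-1, -1, -1) is a right fold over the characters
theorem preToPost_eq_foldr (pre_exp : String) :
    preToPost pre_exp =
      (pre_exp.toList.foldr (fun c st => stepA st c) []).headD "" := by
  unfold preToPost
  have hrev : PySem.List.pyRange ((PySem.Str.len pre_exp) - 1) (-1) (-1)
      = (PySem.List.pyRange 0 (PySem.Str.len pre_exp) 1).reverse := by
    have := PySem.List.pyRange_neg_one_eq_reverse ((PySem.Str.len pre_exp) - 1) (-1)
    simpa using this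
  rw [hrev, List.foldl_reverse]
  congr 1
  have hmap : (PySem.List.pyRange 0 (PySem.Str.len pre_exp) 1).map
      (fun i => PySem.List.pyGetD pre_exp.toList i ' ') = pre_exp.toList := by
    have := PySem.List.map_pyGetD_pyRange_zero' pre_exp.toList ' '
    simpa [PySem.Str.len_eq] using this
  calc (PySem.List.pyRange 0 (PySem.Str.len pre_exp) 1).foldr
        (fun i st => stepA st (PySem.List.pyGetD pre_exp.toList i ' ')) []
      = ((PySem.List.pyRange 0 (PySem.Str.len pre_exp) 1).map
          (fun i => PySem.List.pyGetD pre_exp.toList i ' ')).foldr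
          (fun c st => stepA st c) [] := by rw [List.foldr_map]
    _ = pre_exp.toList.foldr (fun c st => stepA st c) [] := by rw [hmap]

-- ===== VERDICT (by name: the statement is the Claim_ definition above) =====
theorem preToPost_spec : Claim_equal_preToPost := by
  intro pre_exp _hDom hPre
  obtain ⟨hne, hsuf⟩ := hPre
  obtain ⟨e, rem, hparse, -⟩ :=
    parseB_total pre_exp.toList.length pre_exp.toList le_rfl hne hsuf
  unfold Spec_preToPost
  rw [preToPost_eq_foldr]
  rw [parseB_foldr pre_exp.toList.length pre_exp.toList e rem hparse []]
  unfold preToPost_alt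
  rw [hparse]
  rfl
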